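-- pv_equiv track=rewrite | github.com/FFernando2/servilev-pro | cargar_excel.py | sugerir_hoja
-- ===== SOURCE A (Python) =====
-- def sugerir_hoja(hojas):
--     hoja_sugerida = hojas[0]
--
--     for h in hojas:
--         nombre = str(h).strip().lower()
--         if "material sap" in nombre:
--             return h
--
--     for h in hojas:
--         nombre = str(h).strip().lower()
--         if "resumen" in nombre:
--             hoja_sugerida = h
--
--     return hoja_sugerida
-- ===== SOURCE B (Python) =====
-- def sugerir_hoja(hojas):
--     hoja_sugerida = hojas[0]
--     for h in hojas:
--         nombre = str(h).strip().lower()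
--         if "material sap" in nombre:
--             return h
--         if "resumen" in nombre:
--             hoja_sugerida = h
--     return hoja_sugerida
-- ===== Notes on version B (the rewrite author's own statement) =====
-- stated objective: simpler
-- what changed: Replaces A's two sequential full traversals (one searching 'material sap', one rescanning for the last 'resumen') with a single pass that returns on the first 'material sap' match and otherwise tracks the last 'resumen' match; priority is preserved because a 'material sap' match returns immediately before any later 'resumen' could be used.
import Mathlib
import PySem

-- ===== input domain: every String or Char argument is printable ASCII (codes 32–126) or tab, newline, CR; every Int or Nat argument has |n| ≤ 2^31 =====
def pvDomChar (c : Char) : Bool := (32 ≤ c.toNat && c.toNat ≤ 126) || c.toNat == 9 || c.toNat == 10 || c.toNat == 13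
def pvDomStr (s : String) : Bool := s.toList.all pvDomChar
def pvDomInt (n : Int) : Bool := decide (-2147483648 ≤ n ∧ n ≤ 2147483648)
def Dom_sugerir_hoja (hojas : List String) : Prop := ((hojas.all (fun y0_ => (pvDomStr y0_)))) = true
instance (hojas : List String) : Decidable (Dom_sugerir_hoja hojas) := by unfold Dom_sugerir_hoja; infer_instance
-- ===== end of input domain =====

-- B folds A's two sequential traversals into one pass (early return on 'material sap',
-- last-'resumen' accumulator); return values proved equal on non-empty input.

-- ===== PORT A =====
-- nombre = str(h).strip().lower(); "material sap" in nombre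
def pvMatSap (h : String) : Bool :=
  PySem.Str.isIn "material sap" (PySem.Str.lower (PySem.Str.strip h))

def pvResumen (h : String) : Bool :=
  PySem.Str.isIn "resumen" (PySem.Str.lower (PySem.Str.strip h))

def sugerir_hoja (hojas : List String) : String :=
  -- hojas[0] raises IndexError on []; that case is outside Pre_ (arbitrary "" here)
  let hoja_sugerida := hojas.headD ""
  match hojas.find? (fun h => pvMatSap h) with   -- first loop, early return
  | some h => h
  | none =>
      hojas.foldl (fun acc h => if pvResumen h then h else acc) hoja_sugerida  -- second loop

-- ===== PORT B =====
def sugerir_hoja_altLoop (default : String) : List String → String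
  | [] => default
  | h :: t =>
      if pvMatSap h then h
      else if pvResumen h then sugerir_hoja_altLoop h t
      else sugerir_hoja_altLoop default t

def sugerir_hoja_alt (hojas : List String) : String :=
  match hojas with
  | [] => ""                                   -- hojas[0] raises; outside Pre_
  | h0 :: _ => sugerir_hoja_altLoop h0 hojas

-- ===== PRECONDITION & SPEC =====
-- A evaluates hojas[0] first and raises IndexError on the empty list
def Pre_sugerir_hoja (hojas : List String) : Prop := hojas ≠ []
instance (hojas : List String) : Decidable (Pre_sugerir_hoja hojas) := by
  unfold Pre_sugerir_hoja; infer_instance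
def pvWitness_sugerir_hoja : List String := (["Resumen", "Material SAP"])

def Spec_sugerir_hoja (hojas : List String) (out : String) : Prop := out = sugerir_hoja_alt hojas
instance (hojas : List String) (out : String) : Decidable (Spec_sugerir_hoja hojas out) := by unfold Spec_sugerir_hoja; infer_instance

-- ===== CLAIM (what is proved, stated in full; the proofs are below) =====
def Claim_equal_sugerir_hoja : Prop := ∀ (hojas : List String), Dom_sugerir_hoja hojas → Pre_sugerir_hoja hojas → Spec_sugerir_hoja hojas (sugerir_hoja hojas)

-- ===== LEMMAS AND PROOFS =====

-- core: A's two-pass computation equals B's one-pass loop, for any starting default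
theorem altLoop_eq (l : List String) : ∀ (d : String),
    (match l.find? (fun h => pvMatSap h) with
     | some h => h
     | none => l.foldl (fun acc h => if pvResumen h then h else acc) d) =
    sugerir_hoja_altLoop d l := by
  induction l with
  | nil => intro d; simp [sugerir_hoja_altLoop]
  | cons h t ih =>
      intro d
      by_cases hm : pvMatSap h
      · simp [sugerir_hoja_altLoop, List.find?, hm]
      · by_cases hr : pvResumen h <;>
          simp [sugerir_hoja_altLoop, List.find?, hm, hr, ← ih]

-- ===== VERDICT (by name: the statement is the Claim_ definition above) =====
theorem sugerir_hoja_spec : Claim_equal_sugerir_hoja := by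
  intro hojas _ hpre
  unfold Spec_sugerir_hoja sugerir_hoja sugerir_hoja_alt
  cases hojas with
  | nil => exact absurd rfl hpre
  | cons h0 t =>
      show (match (h0 :: t).find? (fun h => pvMatSap h) with
            | some h => h
            | none => (h0 :: t).foldl (fun acc h => if pvResumen h then h else acc) ((h0 :: t).headD "")) = _
      rw [List.headD]
      exact altLoop_eq (h0 :: t) h0
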